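-- pv_equiv track=rewrite | github.com/akash-lib/python_practice_solutions | lists/binary_to_int_list.py | binary_to_int_list
-- ===== SOURCE A (Python) =====
-- def binary_to_int_list(str_list):
--
--     result = []
--     for string in str_list:
--         total = 0
--         # Reverse the string to process from least significant bit
--         for pos, char in enumerate(string[::-1]):
--             if char in ('0', '1'):             # valid binary digits
--                 total += int(char) * (2 ** pos)
--             else:
--
--                 total = None
--                 break
--         result.append(total)
--     return result
-- ===== SOURCE B (Python) =====
-- def binary_to_int_list(str_list):
--     def convert(string):
--         # valid iff every char is '0' or '1'; empty string converts to 0 (A's vacuous loop)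
--         if not all(c in '01' for c in string):
--             return None
--         return int(string, 2) if string else 0
--     return [convert(s) for s in str_list]
-- ===== Notes on version B (the rewrite author's own statement) =====
-- stated objective: idiomatic
-- what changed: Replaces A's reversed-enumerate power-of-two accumulation per string with an explicit all-chars-in-'01' validity check followed by a single library parse int(string, 2) (empty string mapped to 0).
import Mathlib
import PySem

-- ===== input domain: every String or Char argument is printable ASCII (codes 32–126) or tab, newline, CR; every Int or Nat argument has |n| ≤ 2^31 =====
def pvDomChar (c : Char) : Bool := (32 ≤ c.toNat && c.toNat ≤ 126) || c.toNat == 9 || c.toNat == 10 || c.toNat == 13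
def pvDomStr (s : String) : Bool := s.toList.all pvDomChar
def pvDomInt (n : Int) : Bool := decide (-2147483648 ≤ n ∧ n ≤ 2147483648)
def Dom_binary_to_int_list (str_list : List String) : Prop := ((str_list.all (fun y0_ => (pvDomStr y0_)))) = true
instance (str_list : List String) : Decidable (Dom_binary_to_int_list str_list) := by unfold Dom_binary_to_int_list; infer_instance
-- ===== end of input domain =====

-- B replaces A's reversed-enumerate power-of-two accumulation with a validity check plus a single
-- most-significant-first base-2 parse (int(string, 2), empty string → 0); objective: idiomatic.

-- ===== PORT A =====
-- inner loop: 'for pos, char in enumerate(string[::-1])' as structural recursion carrying pos;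
-- on invalid char total = None and break; int(char) for char in ('0','1') is the 0/1 digit value
def pvALoop : List Char → Nat → Int → Option Int
  | [], _, total => some total
  | c :: rest, pos, total =>
    if c = '0' ∨ c = '1' then
      pvALoop rest (pos + 1) (total + (if c = '1' then (1 : Int) else 0) * 2 ^ pos)
    else none

def binary_to_int_list (str_list : List String) : List (Option Int) :=
  -- string[::-1] is the reversed character list (PySem.Str.slice?_none_none_neg_one)
  str_list.foldl (fun result s => result ++ [pvALoop s.toList.reverse 0 0]) []

-- ===== PORT B =====
def pvBConv (s : String) : Option Int :=
  if s.toList.all (fun c => c = '0' || c = '1') then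
    -- int(s, 2) on a validated '0'/'1' string is the most-significant-first base-2 fold
    some (if s.toList = [] then 0 else s.toList.foldl (fun acc c => acc * 2 + (if c = '1' then 1 else 0)) 0)
  else none

def binary_to_int_list_alt (str_list : List String) : List (Option Int) :=
  str_list.map pvBConv

-- ===== PRECONDITION & SPEC =====
def Spec_binary_to_int_list (str_list : List String) (out : List (Option Int)) : Prop := out = binary_to_int_list_alt str_list
instance (str_list : List String) (out : List (Option Int)) : Decidable (Spec_binary_to_int_list str_list out) := by unfold Spec_binary_to_int_list; infer_instance

-- ===== CLAIM (what is proved, stated in full; the proofs are below) =====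
def Claim_equal_binary_to_int_list : Prop := ∀ (str_list : List String), Dom_binary_to_int_list str_list → Spec_binary_to_int_list str_list (binary_to_int_list str_list)

-- ===== LEMMAS AND PROOFS =====

-- little-endian value of a digit list
def pvW : List Char → Int
  | [] => 0
  | c :: r => (if c = '1' then 1 else 0) + 2 * pvW r

theorem pvALoop_eq (r : List Char) : ∀ (pos : Nat) (total : Int),
    pvALoop r pos total =
      if r.all (fun c => c = '0' || c = '1') then some (total + 2 ^ pos * pvW r) else none := by
  induction r with
  | nil => intro pos total; simp [pvALoop, pvW]
  | cons c rest ih =>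
    intro pos total
    by_cases h : c = '0' ∨ c = '1'
    · rw [pvALoop, if_pos h, ih]
      have hc : (c = '0' || c = '1') = true := by
        rcases h with h | h <;> simp [h]
      simp only [List.all_cons, hc, Bool.true_and, pvW]
      split_ifs with hrest <;>
        first
        | rfl
        | (congr 1; rw [pow_succ]; ring)
    · rw [pvALoop, if_neg h]
      have hc : (c = '0' || c = '1') = false := by
        simp only [Bool.or_eq_false_iff, decide_eq_false_iff_not]
        exact ⟨fun h0 => h (Or.inl h0), fun h1 => h (Or.inr h1)⟩
      simp [hc]

theorem pvW_append (r : List Char) (c : Char) :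
    pvW (r ++ [c]) = pvW r + (if c = '1' then 1 else 0) * 2 ^ r.length := by
  induction r with
  | nil => simp [pvW]
  | cons d rest ih =>
    simp only [List.cons_append, pvW, ih, List.length_cons, pow_succ]
    ring

theorem foldl_eq_pvW_reverse (l : List Char) : ∀ (acc : Int),
    l.foldl (fun acc c => acc * 2 + (if c = '1' then 1 else 0)) acc
      = acc * 2 ^ l.length + pvW l.reverse := by
  induction l with
  | nil => intro acc; simp [pvW]
  | cons c rest ih =>
    intro acc
    simp only [List.foldl_cons, ih, List.reverse_cons, pvW_append, List.length_cons,
      List.length_reverse, pow_succ]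
    ring

theorem per_string (s : String) : pvALoop s.toList.reverse 0 0 = pvBConv s := by
  rw [pvALoop_eq, pvBConv]
  simp only [List.all_reverse, pow_zero, one_mul, zero_add]
  split_ifs with hall hnil
  · simp [hnil, pvW]
  · rw [foldl_eq_pvW_reverse]
    simp
  · rfl

theorem foldl_append_singleton (g : String → Option Int) (l : List String) :
    ∀ (init : List (Option Int)),
      l.foldl (fun result s => result ++ [g s]) init = init ++ l.map g := by
  induction l with
  | nil => intro init; simp
  | cons s rest ih => intro init; simp [List.foldl_cons, ih]

-- ===== VERDICT (by name: the statement is the Claim_ definition above) =====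
theorem binary_to_int_list_spec : Claim_equal_binary_to_int_list := by
  intro str_list _
  unfold Spec_binary_to_int_list binary_to_int_list binary_to_int_list_alt
  rw [foldl_append_singleton]
  simp [per_string]
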